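-- pv_equiv track=rewrite | github.com/mujtaba-a-khan/adv-multiagent-framework | src/adversarial_framework/strategies/advanced/visual_injection.py | _text_to_ascii_art
-- ===== SOURCE A (Python) =====
-- def _text_to_ascii_art(text: str) -> str:
--     """Convert text to simple ASCII art representation."""
--     lines = []
--     for char in text.upper():
--         if char == " ":
--             lines.append("   ")
--         else:
--             lines.append(f"[{char}]")
--     # Group into lines of ~60 chars
--     art = ""
--     line_len = 0
--     for block in lines:
--         if line_len + len(block) > 60:
--             art += "\n"
--             line_len = 0
--         art += block
--         line_len += len(block)
--     return art
-- ===== SOURCE B (Python) =====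
-- def _text_to_ascii_art(text: str) -> str:
--     """Convert text to simple ASCII art representation."""
--     blocks = ["   " if char == " " else f"[{char}]" for char in text.upper()]
--     rows = []
--     i = 0
--     while i < len(blocks):
--         rows.append("".join(blocks[i : i + 20]))
--         i += 20
--     return "\n".join(rows)
-- ===== Notes on version B (the rewrite author's own statement) =====
-- stated objective: simpler
-- what changed: B replaces the running line-length accumulator with fixed-size chunking: every block is exactly 3 chars, so rows are groups of 20 blocks joined with newlines (str.join) instead of a stateful width counter with repeated string concatenation.
import Mathlib
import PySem

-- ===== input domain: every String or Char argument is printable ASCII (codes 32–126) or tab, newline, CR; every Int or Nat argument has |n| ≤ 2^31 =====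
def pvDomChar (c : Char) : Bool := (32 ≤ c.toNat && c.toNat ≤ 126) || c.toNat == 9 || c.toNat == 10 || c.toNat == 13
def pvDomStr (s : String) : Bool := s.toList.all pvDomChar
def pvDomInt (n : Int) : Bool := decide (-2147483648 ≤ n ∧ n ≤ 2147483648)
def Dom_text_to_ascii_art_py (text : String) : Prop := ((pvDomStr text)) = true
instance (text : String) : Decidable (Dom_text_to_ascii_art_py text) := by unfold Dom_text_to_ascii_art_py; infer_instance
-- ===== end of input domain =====

-- B replaces A's running line-length accumulator with fixed 20-block chunking (each block is 3 chars): simpler.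

-- ===== PORT A =====
-- one step of A's second loop: wrap when the running line length would exceed 60, then append the block
def pvStepA (st : List Char × Int) (block : List Char) : List Char × Int :=
  let p := if st.2 + (block.length : Int) > 60 then (st.1 ++ ['\n'], (0 : Int)) else (st.1, st.2)
  (p.1 ++ block, p.2 + (block.length : Int))

def text_to_ascii_art_py (text : String) : String :=
  let lines : List (List Char) :=
    (PySem.Chars.upper text.toList).foldl
      (fun acc char => acc ++ [if char == ' ' then [' ', ' ', ' '] else ['[', char, ']']]) []
  String.ofList (lines.foldl pvStepA ([], 0)).1

-- ===== PORT B =====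
-- B's while loop: while i < len(blocks): rows.append("".join(blocks[i : i + 20])); i += 20
def pvRowsB (blocks : List (List Char)) (i : Nat) : List (List Char) :=
  if i < blocks.length then
    (PySem.List.slice blocks (some (i : Int)) (some ((i : Int) + 20))).flatten
      :: pvRowsB blocks (i + 20)
  else []
  termination_by blocks.length - i
  decreasing_by omega

def text_to_ascii_art_py_alt (text : String) : String :=
  let blocks : List (List Char) :=
    (PySem.Chars.upper text.toList).map
      (fun char => if char == ' ' then [' ', ' ', ' '] else ['[', char, ']'])
  String.ofList (PySem.Chars.join ['\n'] (pvRowsB blocks 0))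

-- ===== PRECONDITION & SPEC =====
def Spec_text_to_ascii_art_py (text : String) (out : String) : Prop := out = text_to_ascii_art_py_alt text
instance (text : String) (out : String) : Decidable (Spec_text_to_ascii_art_py text out) := by unfold Spec_text_to_ascii_art_py; infer_instance

-- ===== CLAIM (what is proved, stated in full; the proofs are below) =====
def Claim_equal_text_to_ascii_art_py : Prop := ∀ (text : String), Dom_text_to_ascii_art_py text → Spec_text_to_ascii_art_py text (text_to_ascii_art_py text)

-- ===== LEMMAS AND PROOFS =====

-- structural (head-of-list) form of B's chunking, used only by the proofs
def pvChunk : List (List Char) → List (List Char)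
  | [] => []
  | b :: rest => ((b :: rest).take 20).flatten :: pvChunk ((b :: rest).drop 20)
  termination_by bs => bs.length
  decreasing_by simp [List.drop]

lemma pvChunk_nil : pvChunk [] = [] := by rw [pvChunk.eq_def]

lemma pvChunk_cons (b : List Char) (rest : List (List Char)) :
    pvChunk (b :: rest) = ((b :: rest).take 20).flatten :: pvChunk ((b :: rest).drop 20) := by
  rw [pvChunk.eq_def]

-- B's index-based while loop visits exactly the successive 20-block chunks of the suffix at i
lemma pvRowsB_eq_chunk (blocks : List (List Char)) :
    ∀ (n i : Nat), blocks.length - i ≤ n → pvRowsB blocks i = pvChunk (blocks.drop i) := by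
  intro n
  induction n with
  | zero =>
    intro i hi
    have hge : blocks.length ≤ i := by omega
    rw [pvRowsB, if_neg (by omega), List.drop_eq_nil_of_le hge, pvChunk_nil]
  | succ m ih =>
    intro i hi
    by_cases hlt : i < blocks.length
    · rw [pvRowsB, if_pos hlt, ih (i + 20) (by omega)]
      have hslice : PySem.List.slice blocks (some (i : Int)) (some ((i : Int) + 20))
          = (blocks.drop i).take 20 := by
        have := PySem.List.slice_natCast_add blocks i 20
        simpa using this
      have hne : blocks.drop i ≠ [] := by
        rw [Ne, List.drop_eq_nil_iff]; omega
      rcases List.exists_cons_of_ne_nil hne with ⟨b, rest, hb⟩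
      rw [hb] at hslice ⊢
      rw [pvChunk_cons, ← hslice]
      have : List.drop (i + 20) blocks = List.drop 20 (b :: rest) := by
        rw [← hb, List.drop_drop, Nat.add_comm]
      rw [this]
    · rw [pvRowsB, if_neg hlt, List.drop_eq_nil_of_le (by omega), pvChunk_nil]

lemma pvRowsB_zero (blocks : List (List Char)) : pvRowsB blocks 0 = pvChunk blocks := by
  rw [pvRowsB_eq_chunk blocks blocks.length 0 (by omega), List.drop_zero]

-- every block produced from a character has length 3
lemma pv_block_len (cs : List Char) :
    ∀ b ∈ cs.map (fun char => if char == ' ' then [' ', ' ', ' '] else ['[', char, ']']), b.length = 3 := by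
  intro b hb
  rcases List.mem_map.1 hb with ⟨c, _, rfl⟩
  by_cases h : c == ' ' <;> simp [h]

-- B's chunked join, unrolled one row at a time
lemma pv_join_rows (bs : List (List Char)) (hne : bs ≠ []) :
    PySem.Chars.join ['\n'] (pvChunk bs) =
      (bs.take 20).flatten ++
        (if bs.length ≤ 20 then [] else '\n' :: PySem.Chars.join ['\n'] (pvChunk (bs.drop 20))) := by
  rcases List.exists_cons_of_ne_nil hne with ⟨b, rest, rfl⟩
  by_cases hr : (b :: rest).length ≤ 20
  · have hdrop : (b :: rest).drop 20 = [] := by rw [List.drop_eq_nil_iff]; omega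
    rw [pvChunk_cons, hdrop, pvChunk_nil, PySem.Chars.join_singleton, if_pos hr, List.append_nil]
  · have hdrop : (b :: rest).drop 20 ≠ [] := by rw [Ne, List.drop_eq_nil_iff]; omega
    rcases List.exists_cons_of_ne_nil hdrop with ⟨y, ys, hy⟩
    rw [pvChunk_cons, if_neg hr, hy, pvChunk_cons, PySem.Chars.join_cons_cons, ← pvChunk_cons, ← hy]
    simp

-- the central invariant of A's wrapping loop: with 3·k columns of capacity left in the current
-- line, the loop emits the next k blocks on this line and then chunks the remainder 20 per row
lemma pv_seg (bs : List (List Char)) : ∀ (k : Nat) (art : List Char), k ≤ 20 →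
    (∀ b ∈ bs, b.length = 3) →
    (bs.foldl pvStepA (art, (60 : Int) - 3 * k)).1 =
      art ++ (bs.take k).flatten ++
        (if bs.length ≤ k then [] else '\n' :: PySem.Chars.join ['\n'] (pvChunk (bs.drop k))) := by
  induction bs with
  | nil => intro k art _ _; simp
  | cons b rest ih =>
    intro k art hk hlen
    have hb : b.length = 3 := hlen b (by simp)
    have hrest : ∀ x ∈ rest, x.length = 3 := fun x hx => hlen x (by simp [hx])
    match k with
    | 0 =>
      have hstep : pvStepA (art, (60 : Int) - 3 * ((0 : Nat) : Int)) b
          = (art ++ ['\n'] ++ b, (3 : Int)) := by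
        simp [pvStepA, hb]
      have ih' := ih 19 (art ++ ['\n'] ++ b) (by omega) hrest
      rw [show (60 : Int) - 3 * ((19 : Nat) : Int) = 3 by norm_num] at ih'
      rw [List.foldl_cons, hstep, ih']
      simp only [List.take_zero, List.flatten_nil, List.drop_zero, List.append_nil]
      rw [pv_join_rows (b :: rest) (by simp), if_neg (by simp : ¬ (b :: rest).length ≤ 0)]
      by_cases hr : rest.length ≤ 19
      · rw [if_pos hr, if_pos (by simp; omega : (b :: rest).length ≤ 20)]
        simp [List.take_succ_cons, List.append_assoc]
      · rw [if_neg hr, if_neg (by simp; omega : ¬ (b :: rest).length ≤ 20)]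
        simp [List.take_succ_cons, List.drop_succ_cons, List.append_assoc]
    | k' + 1 =>
      have hstep : pvStepA (art, (60 : Int) - 3 * (((k' : Nat) : Int) + 1)) b
          = (art ++ b, (60 : Int) - 3 * ((k' : Nat) : Int)) := by
        simp only [pvStepA, hb]
        rw [if_neg (by omega)]
        norm_num; ring
      rw [List.foldl_cons]
      push_cast
      rw [hstep, ih k' (art ++ b) (by omega) hrest]
      by_cases hr : rest.length ≤ k'
      · rw [if_pos hr, if_pos (by simp; omega : (b :: rest).length ≤ k' + 1)]
        simp [List.take_succ_cons, List.append_assoc]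
      · rw [if_neg hr, if_neg (by simp; omega : ¬ (b :: rest).length ≤ k' + 1)]
        simp [List.take_succ_cons, List.drop_succ_cons, List.append_assoc]

-- the k = 20 instance of the invariant is exactly B's chunked join
lemma pv_fold_eq_rows (bs : List (List Char)) (h : ∀ b ∈ bs, b.length = 3) :
    (bs.foldl pvStepA ([], 0)).1 = PySem.Chars.join ['\n'] (pvChunk bs) := by
  have h60 : (0 : Int) = (60 : Int) - 3 * ((20 : Nat) : Int) := by norm_num
  rw [h60, pv_seg bs 20 [] le_rfl h]
  match bs with
  | [] => simp [pvChunk_nil, PySem.Chars.join_nil]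
  | b :: rest => rw [pv_join_rows (b :: rest) (by simp)]; simp

-- ===== VERDICT (by name: the statement is the Claim_ definition above) =====
theorem text_to_ascii_art_py_spec : Claim_equal_text_to_ascii_art_py := by
  intro text _
  unfold Spec_text_to_ascii_art_py
  simp only [text_to_ascii_art_py, text_to_ascii_art_py_alt,
    PySem.List.foldl_append_singleton_eq_map, List.nil_append]
  rw [pv_fold_eq_rows _ (pv_block_len _), pvRowsB_zero]
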